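-- pv_equiv track=rewrite | github.com/repeale/fp-go | generators/generators.py | pipe_test
-- ===== SOURCE A (Python) =====
-- def pipe_test(n: int) -> str:
-- 	funcs = ["add1", "double"]
-- 	fns = ", ".join(funcs[i % 2] for i in range(n))
--
-- 	expect = 0
-- 	for i in range(n):
-- 		if i % 2 == 0:
-- 			expect += 1
-- 		else:
-- 			expect *= 2
--
-- 	return f"""
-- func TestPipe{n}_Example(t *testing.T) {{
-- 	res := Pipe{n}({fns})(0)
-- 	if res != {expect} {{
-- 		t.Error("Should perform left-to-right function composition of {n} functions. Received:", res)
-- 	}}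
-- }}"""
-- ===== SOURCE B (Python) =====
-- def pipe_test(n: int) -> str:
--     m = n if n > 0 else 0
--     fns = ", ".join((["add1", "double"] * ((m + 1) // 2))[:m])
--     if n <= 0:
--         expect = 0
--     elif n % 2 == 1:
--         expect = 2 ** (n // 2 + 1) - 1
--     else:
--         expect = 2 ** (n // 2 + 1) - 2
--     return f"""
-- func TestPipe{n}_Example(t *testing.T) {{
-- 	res := Pipe{n}({fns})(0)
-- 	if res != {expect} {{
-- 		t.Error("Should perform left-to-right function composition of {n} functions. Received:", res)
-- 	}}
-- }}"""
-- ===== Notes on version B (the rewrite author's own statement) =====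
-- stated objective: faster
-- what changed: The n-iteration alternating add1/double accumulation loop computing the expected value is replaced by a single closed-form power of two, and the per-index generator building the argument list is replaced by slicing a replicated two-element list.
import Mathlib
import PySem

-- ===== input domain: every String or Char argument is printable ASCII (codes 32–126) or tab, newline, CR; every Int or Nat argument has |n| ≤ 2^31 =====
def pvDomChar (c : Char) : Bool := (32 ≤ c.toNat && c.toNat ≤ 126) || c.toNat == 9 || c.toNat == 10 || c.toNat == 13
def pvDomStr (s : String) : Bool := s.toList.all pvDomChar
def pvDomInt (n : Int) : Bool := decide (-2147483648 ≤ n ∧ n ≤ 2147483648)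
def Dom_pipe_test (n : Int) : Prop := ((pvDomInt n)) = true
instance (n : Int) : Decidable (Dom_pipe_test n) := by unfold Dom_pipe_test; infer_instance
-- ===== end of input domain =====

-- B replaces the n-step alternating accumulation loop for `expect` by a closed-form
-- power of two and builds `fns` by slicing a replicated pair instead of a per-index
-- generator (objective: faster).

-- ===== PORT A =====
-- funcs[i % 2] is ported with pyGetD: the index i % 2 is always 0 or 1, in range of the
-- two-element list, so Python never raises here and the default is never used.
def pipe_test (n : Int) : String :=
  let funcs : List String := ["add1", "double"]
  let fns : String := PySem.Str.join ", "
    ((PySem.List.pyRange 0 n 1).map (fun i => PySem.List.pyGetD funcs (PySem.Int.mod i 2) ""))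
  let expect : Int := (PySem.List.pyRange 0 n 1).foldl
    (fun e i => if PySem.Int.mod i 2 = 0 then e + 1 else e * 2) 0
  "\nfunc TestPipe" ++ PySem.Int.toStr n ++ "_Example(t *testing.T) {\n\tres := Pipe"
    ++ PySem.Int.toStr n ++ "(" ++ fns ++ ")(0)\n\tif res != " ++ PySem.Int.toStr expect
    ++ " {\n\t\tt.Error(\"Should perform left-to-right function composition of "
    ++ PySem.Int.toStr n ++ " functions. Received:\", res)\n\t}\n}"

-- ===== PORT B =====
-- ["add1","double"] * k is ported as flatten (replicate k); 2 ** e (e = n//2 + 1 ≥ 1 in the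
-- branches where it is evaluated) is ported as 2 ^ e.toNat — exact for nonnegative exponents.
def pipe_test_alt (n : Int) : String :=
  let m : Int := if n > 0 then n else 0
  let fns : String := PySem.Str.join ", "
    (PySem.List.slice
      (List.flatten (List.replicate (PySem.Int.floordiv (m + 1) 2).toNat ["add1", "double"]))
      none (some m))
  let expect : Int :=
    if n ≤ 0 then 0
    else if PySem.Int.mod n 2 = 1 then 2 ^ (PySem.Int.floordiv n 2 + 1).toNat - 1
    else 2 ^ (PySem.Int.floordiv n 2 + 1).toNat - 2
  "\nfunc TestPipe" ++ PySem.Int.toStr n ++ "_Example(t *testing.T) {\n\tres := Pipe"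
    ++ PySem.Int.toStr n ++ "(" ++ fns ++ ")(0)\n\tif res != " ++ PySem.Int.toStr expect
    ++ " {\n\t\tt.Error(\"Should perform left-to-right function composition of "
    ++ PySem.Int.toStr n ++ " functions. Received:\", res)\n\t}\n}"

-- ===== PRECONDITION & SPEC =====
def Spec_pipe_test (n : Int) (out : String) : Prop := out = pipe_test_alt n
instance (n : Int) (out : String) : Decidable (Spec_pipe_test n out) := by unfold Spec_pipe_test; infer_instance

-- ===== CLAIM (what is proved, stated in full; the proofs are below) =====
def Claim_equal_pipe_test : Prop := ∀ (n : Int), Dom_pipe_test n → Spec_pipe_test n (pipe_test n)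

-- ===== LEMMAS AND PROOFS =====

-- Nat-level list equality behind the two `fns` builds.
theorem pv_fns_nat : ∀ (k : Nat),
    (List.range k).map (fun j => if j % 2 = 0 then "add1" else "double")
      = (List.flatten (List.replicate ((k + 1) / 2) ["add1", "double"])).take k
  | 0 => by rfl
  | 1 => by rfl
  | (k + 2) => by
      have ih := pv_fns_nat k
      have hadd : k + 2 = 2 + k := by omega
      have hdiv : (k + 2 + 1) / 2 = (k + 1) / 2 + 1 := by omega
      have hcomp :
          ((fun j : Nat => if j % 2 = 0 then "add1" else "double") ∘ fun x : Nat => 2 + x)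
            = fun j : Nat => if j % 2 = 0 then "add1" else "double" := by
        funext j
        have h : (2 + j) % 2 = j % 2 := by omega
        simp [Function.comp, h]
      conv_lhs => rw [hadd, List.range_add, List.map_append, List.map_map, hcomp, ih]
      rw [hdiv, List.replicate_succ, List.flatten_cons]
      rfl

-- Nat-level closed form for the alternating accumulation loop.
theorem pv_expect_nat : ∀ (k : Nat),
    (List.range k).foldl (fun (e : Int) (j : Nat) => if j % 2 = 0 then e + 1 else e * 2) 0
      = (if k % 2 = 1 then 2 ^ (k / 2 + 1) - 1 else 2 ^ (k / 2 + 1) - 2)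
  | 0 => by rfl
  | 1 => by rfl
  | (k + 2) => by
      have ih := pv_expect_nat k
      rw [List.range_succ, List.foldl_append, List.range_succ, List.foldl_append,
        List.foldl_cons, List.foldl_nil, List.foldl_cons, List.foldl_nil, ih]
      have hd : (k + 2) / 2 + 1 = (k / 2 + 1) + 1 := by omega
      rcases Nat.even_or_odd k with he | ho
      · have h0 : k % 2 = 0 := Nat.even_iff.mp he
        rw [if_neg (by omega : ¬ k % 2 = 1), if_pos h0,
          if_neg (by omega : ¬ (k + 1) % 2 = 0), if_neg (by omega : ¬ (k + 2) % 2 = 1),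
          hd, pow_succ]
        ring
      · have h1 : k % 2 = 1 := Nat.odd_iff.mp ho
        rw [if_pos h1, if_neg (by omega : ¬ k % 2 = 0), if_pos (by omega : (k + 1) % 2 = 0),
          if_pos (by omega : (k + 2) % 2 = 1), hd, pow_succ]
        ring

-- Bridge: A's fns list equals B's fns list, over Int.
theorem pv_fns_eq (n : Int) :
    (PySem.List.pyRange 0 n 1).map
        (fun i => PySem.List.pyGetD ["add1", "double"] (PySem.Int.mod i 2) "")
      = PySem.List.slice
          (List.flatten (List.replicate
            (PySem.Int.floordiv ((if n > 0 then n else 0) + 1) 2).toNat ["add1", "double"]))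
          none (some (if n > 0 then n else 0)) := by
  by_cases hn : n > 0
  · obtain ⟨k, hk⟩ : ∃ k : Nat, n = (k : Int) := ⟨n.toNat, (Int.toNat_of_nonneg (by omega)).symm⟩
    subst hk
    rw [if_pos hn]
    have hfd : PySem.Int.floordiv ((k : Int) + 1) 2 = (((k + 1) / 2 : Nat) : Int) := by
      exact_mod_cast PySem.Int.floordiv_natCast (k + 1) 2
    rw [hfd, Int.toNat_natCast, PySem.List.slice_to_natCast, PySem.List.pyRange_one,
      List.map_map]
    have hk0 : ((k : Int) - 0).toNat = k := by omega
    rw [hk0]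
    have hfun :
        ((fun i => PySem.List.pyGetD ["add1", "double"] (PySem.Int.mod i 2) "") ∘
            fun j : Nat => (0 : Int) + (j : Int))
          = fun j : Nat => if j % 2 = 0 then "add1" else "double" := by
      funext j
      have hm : PySem.Int.mod ((0 : Int) + (j : Int)) 2 = ((j % 2 : Nat) : Int) := by
        rw [zero_add]
        exact_mod_cast PySem.Int.mod_natCast j 2
      simp only [Function.comp_apply, hm, PySem.List.pyGetD_natCast]
      rcases Nat.even_or_odd j with he | ho
      · simp [Nat.even_iff.mp he]
      · simp [Nat.odd_iff.mp ho]
    rw [hfun]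
    exact pv_fns_nat k
  · rw [if_neg hn]
    have h1 : PySem.List.pyRange 0 n 1 = [] := by
      rw [PySem.List.pyRange_one]
      have h0 : (n - 0).toNat = 0 := by omega
      rw [h0]
      rfl
    rw [h1]
    rfl

-- Bridge: A's loop value equals B's closed form, over Int.
theorem pv_expect_eq (n : Int) :
    (PySem.List.pyRange 0 n 1).foldl
        (fun e i => if PySem.Int.mod i 2 = 0 then e + 1 else e * 2) 0
      = (if n ≤ 0 then (0 : Int)
         else if PySem.Int.mod n 2 = 1 then 2 ^ (PySem.Int.floordiv n 2 + 1).toNat - 1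
         else 2 ^ (PySem.Int.floordiv n 2 + 1).toNat - 2) := by
  by_cases hn : n ≤ 0
  · have h1 : PySem.List.pyRange 0 n 1 = [] := by
      rw [PySem.List.pyRange_one]
      have h0 : (n - 0).toNat = 0 := by omega
      rw [h0]
      rfl
    rw [h1, if_pos hn]
    rfl
  · obtain ⟨k, hk⟩ : ∃ k : Nat, n = (k : Int) := ⟨n.toNat, (Int.toNat_of_nonneg (by omega)).symm⟩
    subst hk
    rw [if_neg hn, PySem.List.pyRange_one]
    have hk0 : ((k : Int) - 0).toNat = k := by omega
    rw [hk0, List.foldl_map]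
    refine Eq.trans
      (List.foldl_ext _ (fun (e : Int) (j : Nat) => if j % 2 = 0 then e + 1 else e * 2) (0 : Int) ?_) ?_
    · intro e j _
      beta_reduce
      split_ifs with ha hb hb
      · rfl
      · rw [PySem.Int.mod_eq_zero_iff_dvd] at ha
        exfalso
        omega
      · rw [PySem.Int.mod_eq_zero_iff_dvd] at ha
        exfalso
        omega
      · rfl
    · rw [pv_expect_nat k]
      have hmod : PySem.Int.mod (k : Int) 2 = ((k % 2 : Nat) : Int) := by
        exact_mod_cast PySem.Int.mod_natCast k 2
      have hdv : PySem.Int.floordiv (k : Int) 2 = ((k / 2 : Nat) : Int) := by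
        exact_mod_cast PySem.Int.floordiv_natCast k 2
      rw [hmod, hdv]
      have htn : (((k / 2 : Nat) : Int) + 1).toNat = k / 2 + 1 := by omega
      rw [htn]
      rcases Nat.even_or_odd k with he | ho
      · simp [Nat.even_iff.mp he]
      · simp [Nat.odd_iff.mp ho]

-- ===== VERDICT (by name: the statement is the Claim_ definition above) =====
theorem pipe_test_spec : Claim_equal_pipe_test := by
  intro n _
  show pipe_test n = pipe_test_alt n
  simp only [pipe_test, pipe_test_alt]
  rw [pv_fns_eq n, pv_expect_eq n]
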